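-- pv_equiv track=rewrite | github.com/MMadmax/CulFiT | src/eval/hofstede/hofstede.py | answer_extract
-- ===== SOURCE A (Python) =====
-- def answer_extract(response, row=None):
--     choices = ['A', 'B', 'C', 'D', 'E']
--     answer = ""
--     for choice in choices:
--         if choice in response:
--             answer = choice
--             break
--     return answer
-- ===== SOURCE B (Python) =====
-- def answer_extract(response, row=None):
--     seen = set(response) & {'A', 'B', 'C', 'D', 'E'}
--     return min(seen, default="")
-- ===== Notes on version B (the rewrite author's own statement) =====
-- stated objective: idiomatic
-- what changed: Replaces the loop-with-break doing up to five substring scans of the response by building set(response) once, intersecting it with the choice set and taking the minimum (empty-string default), which equals the first letter the loop would hit since the choices are single characters in alphabetical order.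
import Mathlib
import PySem

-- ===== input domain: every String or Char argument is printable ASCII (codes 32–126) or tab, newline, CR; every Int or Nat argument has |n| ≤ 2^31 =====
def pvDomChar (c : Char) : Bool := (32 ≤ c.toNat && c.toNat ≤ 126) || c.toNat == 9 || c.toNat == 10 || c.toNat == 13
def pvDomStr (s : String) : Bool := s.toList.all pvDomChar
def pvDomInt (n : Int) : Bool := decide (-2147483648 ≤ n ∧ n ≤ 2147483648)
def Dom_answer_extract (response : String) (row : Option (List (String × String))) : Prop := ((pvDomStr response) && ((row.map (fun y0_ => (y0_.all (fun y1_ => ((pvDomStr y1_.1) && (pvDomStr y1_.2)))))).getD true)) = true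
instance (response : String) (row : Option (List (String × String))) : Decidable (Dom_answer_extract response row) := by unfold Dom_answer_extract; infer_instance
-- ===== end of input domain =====

-- B replaces A's five sequential substring scans with a break by one set-build over the
-- response intersected with the choice set, taking the minimum (idiomatic; same behaviour).

-- ===== PORT A =====
-- the 'for choice in choices: if choice in response: answer = choice; break' loop
def pvALoop (response : String) : List String → String
  | [] => ""                      -- loop ends, answer still ""
  | c :: rest =>
      if PySem.Str.isIn c response then c   -- answer = choice; break
      else pvALoop response rest

def answer_extract (response : String) (row : Option (List (String × String))) : String :=
  let choices : List String := ["A", "B", "C", "D", "E"]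
  pvALoop response choices

-- ===== PORT B =====
-- set(response) is modelled as a PySem.Set of Chars (Python's 1-char strings); exact here since
-- min over single-character ASCII strings coincides with min over their characters.
def answer_extract_alt (response : String) (row : Option (List (String × String))) : String :=
  -- seen = set(response) & {'A','B','C','D','E'}; min(seen, default="")
  match PySem.List.min?
      (PySem.Set.inter (PySem.Set.ofList response.toList) (PySem.Set.ofList ['A', 'B', 'C', 'D', 'E']))
      (fun c => c) with
  | some c => String.ofList [c]
  | none => ""                    -- min's default

-- ===== PRECONDITION & SPEC =====
def Spec_answer_extract (response : String) (row : Option (List (String × String))) (out : String) : Prop := out = answer_extract_alt response row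
instance (response : String) (row : Option (List (String × String))) (out : String) : Decidable (Spec_answer_extract response row out) := by unfold Spec_answer_extract; infer_instance

-- ===== CLAIM (what is proved, stated in full; the proofs are below) =====
def Claim_equal_answer_extract : Prop := ∀ (response : String) (row : Option (List (String × String))), Dom_answer_extract response row → Spec_answer_extract response row (answer_extract response row)

-- ===== LEMMAS AND PROOFS =====

-- 'c in response' for a single character is character membership
theorem pv_isIn_single (c : Char) (s : String) :
    PySem.Str.isIn (String.ofList [c]) s = true ↔ c ∈ s.toList := by
  rw [PySem.Str.isIn_iff_infix]
  have he : (String.ofList [c]).toList = [c] := by simp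
  rw [he]
  constructor
  · intro h
    exact List.singleton_sublist.mp h.sublist
  · intro h
    obtain ⟨pre, suf, heq⟩ := List.append_of_mem h
    exact ⟨pre, suf, by simp [heq]⟩

-- min? of a list is v whenever v is a member and a lower bound
theorem pv_min?_eq {xs : List Char} {v : Char} (hv : v ∈ xs)
    (hmin : ∀ y ∈ xs, v ≤ y) : PySem.List.min? xs (fun c => c) = some v := by
  cases h : PySem.List.min? xs (fun c => c) with
  | none => exact absurd ((PySem.List.min?_eq_none_iff xs _).mp h ▸ hv) (by simp)
  | some m =>
    have hm : m ∈ xs := PySem.List.min?_mem h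
    have h1 : m ≤ v := PySem.List.min?_isMin h v hv
    exact congrArg some (le_antisymm h1 (hmin m hm))

-- B returns String.ofList [v] when v is the alphabetically least choice present
theorem pv_alt_eq (response : String) (row : Option (List (String × String))) (v : Char)
    (hv : v ∈ response.toList) (hvc : v ∈ (['A', 'B', 'C', 'D', 'E'] : List Char))
    (hmin : ∀ y ∈ (['A', 'B', 'C', 'D', 'E'] : List Char), y ∈ response.toList → v ≤ y) :
    answer_extract_alt response row = String.ofList [v] := by
  unfold answer_extract_alt
  have : PySem.List.min?
      (PySem.Set.inter (PySem.Set.ofList response.toList) (PySem.Set.ofList ['A', 'B', 'C', 'D', 'E']))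
      (fun c => c) = some v := by
    apply pv_min?_eq
    · rw [PySem.Set.mem_inter]
      exact ⟨(PySem.Set.mem_ofList _ _).mpr hv, (PySem.Set.mem_ofList _ _).mpr hvc⟩
    · intro y hy
      rw [PySem.Set.mem_inter] at hy
      exact hmin y ((PySem.Set.mem_ofList _ _).mp hy.2) ((PySem.Set.mem_ofList _ _).mp hy.1)
  rw [this]

-- B returns "" when none of the five choices occurs
theorem pv_alt_none (response : String) (row : Option (List (String × String)))
    (h : ∀ y ∈ (['A', 'B', 'C', 'D', 'E'] : List Char), y ∉ response.toList) :
    answer_extract_alt response row = "" := by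
  unfold answer_extract_alt
  have hnil : PySem.Set.inter (PySem.Set.ofList response.toList)
      (PySem.Set.ofList ['A', 'B', 'C', 'D', 'E']) = [] := by
    apply List.eq_nil_iff_forall_not_mem.mpr
    intro y hy
    rw [PySem.Set.mem_inter, PySem.Set.mem_ofList, PySem.Set.mem_ofList] at hy
    exact h y hy.2 hy.1
  rw [hnil]
  rfl

-- ===== VERDICT (by name: the statement is the Claim_ definition above) =====
theorem answer_extract_spec : Claim_equal_answer_extract := by
  intro response row _
  unfold Spec_answer_extract answer_extract
  by_cases hA : 'A' ∈ response.toList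
  · rw [pvALoop, if_pos ((pv_isIn_single 'A' response).mpr hA),
      pv_alt_eq response row 'A' hA (by simp) (by intro y hy _; fin_cases hy <;> decide)]
  · rw [pvALoop, if_neg (by simpa using (pv_isIn_single 'A' response).not.mpr hA)]
    by_cases hB : 'B' ∈ response.toList
    · rw [pvALoop, if_pos ((pv_isIn_single 'B' response).mpr hB),
        pv_alt_eq response row 'B' hB (by simp)
          (by intro y hy hyr; fin_cases hy <;> first | decide | exact absurd hyr hA | exact absurd hyr hB | exact absurd hyr hC | exact absurd hyr hD)]
    · rw [pvALoop, if_neg (by simpa using (pv_isIn_single 'B' response).not.mpr hB)]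
      by_cases hC : 'C' ∈ response.toList
      · rw [pvALoop, if_pos ((pv_isIn_single 'C' response).mpr hC),
          pv_alt_eq response row 'C' hC (by simp)
            (by intro y hy hyr; fin_cases hy <;> first | decide | exact absurd hyr hA | exact absurd hyr hB | exact absurd hyr hC | exact absurd hyr hD)]
      · rw [pvALoop, if_neg (by simpa using (pv_isIn_single 'C' response).not.mpr hC)]
        by_cases hD : 'D' ∈ response.toList
        · rw [pvALoop, if_pos ((pv_isIn_single 'D' response).mpr hD),
            pv_alt_eq response row 'D' hD (by simp)
              (by intro y hy hyr; fin_cases hy <;> first | decide | exact absurd hyr hA | exact absurd hyr hB | exact absurd hyr hC | exact absurd hyr hD)]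
        · rw [pvALoop, if_neg (by simpa using (pv_isIn_single 'D' response).not.mpr hD)]
          by_cases hE : 'E' ∈ response.toList
          · rw [pvALoop, if_pos ((pv_isIn_single 'E' response).mpr hE),
              pv_alt_eq response row 'E' hE (by simp)
                (by intro y hy hyr; fin_cases hy <;> first | decide | exact absurd hyr hA | exact absurd hyr hB | exact absurd hyr hC | exact absurd hyr hD)]
          · rw [pvALoop, if_neg (by simpa using (pv_isIn_single 'E' response).not.mpr hE),
              pvALoop, pv_alt_none response row
                (by intro y hy; fin_cases hy <;> assumption)]
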